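-- pv_equiv track=rewrite | github.com/wulinlw/leetcode_cn | 剑指offer/LCP06.拿硬币.py | minCount2
-- ===== SOURCE A (Python) =====
-- from typing import List
--
-- def minCount2(coins: List[int]) -> int:
--     re = 0
--     for i in coins:
--         a, b = divmod(i, 2)
--         re += a
--         if 0<b<=2:
--             re += 1
--     return re
-- ===== SOURCE B (Python) =====
-- from typing import List
--
-- def minCount2(coins: List[int]) -> int:
--     n = len(coins)
--     if n == 0:
--         return 0
--     if n == 1:
--         return (coins[0] + 1) // 2
--     mid = n // 2
--     return minCount2(coins[:mid]) + minCount2(coins[mid:])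
-- ===== Notes on version B (the rewrite author's own statement) =====
-- stated objective: alternative
-- what changed: Replaces A's single-pass accumulator loop (divmod per element plus a remainder branch) by a divide-and-conquer recursion: split the list in half, recurse on each half, and use the closed form (c+1)//2 for the one-element base case.
import Mathlib
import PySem

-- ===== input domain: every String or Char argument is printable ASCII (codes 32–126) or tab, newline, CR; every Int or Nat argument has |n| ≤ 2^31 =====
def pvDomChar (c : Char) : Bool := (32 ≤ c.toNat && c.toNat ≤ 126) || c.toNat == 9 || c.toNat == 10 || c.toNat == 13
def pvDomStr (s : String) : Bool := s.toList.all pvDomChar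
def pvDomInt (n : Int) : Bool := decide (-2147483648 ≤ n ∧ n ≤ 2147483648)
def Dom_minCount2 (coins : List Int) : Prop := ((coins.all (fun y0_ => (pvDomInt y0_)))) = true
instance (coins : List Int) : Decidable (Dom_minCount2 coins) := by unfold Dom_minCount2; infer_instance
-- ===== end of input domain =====

-- B replaces A's single-pass accumulator loop by a divide-and-conquer recursion with a closed-form (c+1)//2 base case (objective: alternative).


-- ===== PORT A =====
def minCount2 (coins : List Int) : Int :=
  coins.foldl (fun re i =>
    let a := PySem.Int.floordiv i 2
    let b := PySem.Int.mod i 2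
    let re := re + a
    if 0 < b ∧ b ≤ 2 then re + 1 else re) 0

-- ===== PORT B =====
def minCount2_alt (coins : List Int) : Int :=
  if coins.length = 0 then 0
  else if coins.length = 1 then
    -- coins[0] on a nonempty list is exactly headI
    PySem.Int.floordiv (coins.headI + 1) 2
  else
    let mid := coins.length / 2
    minCount2_alt (PySem.List.slice coins none (some (mid : Int)))
      + minCount2_alt (PySem.List.slice coins (some (mid : Int)) none)
termination_by coins.length
decreasing_by
  · rw [PySem.List.slice_to_natCast]; simp [List.length_take]; omega
  · rw [PySem.List.slice_from_natCast]; simp [List.length_drop]; omega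

-- ===== PRECONDITION & SPEC =====
def Spec_minCount2 (coins : List Int) (out : Int) : Prop := out = minCount2_alt coins
instance (coins : List Int) (out : Int) : Decidable (Spec_minCount2 coins out) := by unfold Spec_minCount2; infer_instance

-- ===== CLAIM (what is proved, stated in full; the proofs are below) =====
def Claim_equal_minCount2 : Prop := ∀ (coins : List Int), Dom_minCount2 coins → Spec_minCount2 coins (minCount2 coins)

-- ===== LEMMAS AND PROOFS =====

-- per-element value A adds for coin i
def ceilHalf (i : Int) : Int :=
  PySem.Int.floordiv i 2 + (if 0 < PySem.Int.mod i 2 ∧ PySem.Int.mod i 2 ≤ 2 then 1 else 0)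

lemma ceilHalf_closed (i : Int) : ceilHalf i = PySem.Int.floordiv (i + 1) 2 := by
  have h := PySem.Int.floordiv_mul_add_mod i 2
  have h0 := PySem.Int.mod_nonneg i (b := 2) (by norm_num)
  have h1 := PySem.Int.mod_lt i (b := 2) (by norm_num)
  unfold ceilHalf
  rw [eq_comm, PySem.Int.floordiv_eq_iff_of_pos (by norm_num)]
  split_ifs with hc <;> omega

lemma foldl_eq_sum_ceilHalf (coins : List Int) (r : Int) :
    coins.foldl (fun re i =>
      let a := PySem.Int.floordiv i 2
      let b := PySem.Int.mod i 2
      let re := re + a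
      if 0 < b ∧ b ≤ 2 then re + 1 else re) r
    = r + (coins.map ceilHalf).sum := by
  induction coins generalizing r with
  | nil => simp
  | cons i t ih =>
    simp only [List.foldl_cons, List.map_cons, List.sum_cons, ih]
    unfold ceilHalf
    split_ifs <;> ring

lemma alt_eq_sum_ceilHalf (coins : List Int) :
    minCount2_alt coins = (coins.map ceilHalf).sum := by
  induction hn : coins.length using Nat.strong_induction_on generalizing coins with
  | _ n ih =>
    unfold minCount2_alt
    subst hn
    split_ifs with h0 h1
    · rw [List.length_eq_zero_iff.mp h0]; simp
    · obtain ⟨c, rfl⟩ := List.length_eq_one_iff.mp h1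
      simp [ceilHalf_closed]
    · simp only [PySem.List.slice_to_natCast, PySem.List.slice_from_natCast]
      rw [ih _ (by simp [List.length_take]; omega) _ rfl,
          ih _ (by simp [List.length_drop]; omega) _ rfl]
      rw [← List.sum_append, ← List.map_append, List.take_append_drop]

-- ===== VERDICT (by name: the statement is the Claim_ definition above) =====
theorem minCount2_spec : Claim_equal_minCount2 := by
  intro coins _
  unfold Spec_minCount2 minCount2
  rw [foldl_eq_sum_ceilHalf, alt_eq_sum_ceilHalf]
  ring
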